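-- pv_equiv track=rewrite | github.com/kiichi/booklet-tool | cli/booklet_reorder.py | booklet_order_right_open
-- ===== SOURCE A (Python) =====
-- def booklet_order_right_open(n: int) -> list[int | None]:
--     """
--     JP style (right-open):
--     First outer spread: [1 | last]
--     """
--     if n <= 0:
--         return []
--
--     m = ((n + 3) // 4) * 4
--
--     def idx(i: int) -> int | None:
--         return i if i < n else None
--
--     order: list[int | None] = []
--     left = 0
--     right = m - 1
--
--     while left < right:
--         # Sheet front (outside): [left, right]
--         order.append(idx(left))
--         order.append(idx(right))
--         # Sheet back (inside): [right-1, left+1]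
--         order.append(idx(right - 1))
--         order.append(idx(left + 1))
--
--         left += 2
--         right -= 2
--
--     return order
-- ===== SOURCE B (Python) =====
-- def booklet_order_right_open(n: int) -> list[int | None]:
--     """JP style (right-open) booklet order: halve the mapped page list and zip
--     the front half with the reversed back half, two pages at a time."""
--     m = ((n + 3) // 4) * 4
--     pages = [i if i < n else None for i in range(m)]
--     half = m // 2
--     front = pages[:half]
--     back = pages[half:][::-1]
--     fi, bi = iter(front), iter(back)
--     out: list[int | None] = []
--     for (a, b), (d, c) in zip(zip(fi, fi), zip(bi, bi)):
--         out += [a, d, c, b]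
--     return out
-- ===== Notes on version B (the rewrite author's own statement) =====
-- stated objective: alternative
-- what changed: Instead of A's converging left/right index arithmetic, B builds the whole mapped page list up front, splits it into the front half and the reversed back half, and zips the two halves two pages at a time (zip(it, it) pairing), emitting [front, back, back, front] per sheet.
import Mathlib
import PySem

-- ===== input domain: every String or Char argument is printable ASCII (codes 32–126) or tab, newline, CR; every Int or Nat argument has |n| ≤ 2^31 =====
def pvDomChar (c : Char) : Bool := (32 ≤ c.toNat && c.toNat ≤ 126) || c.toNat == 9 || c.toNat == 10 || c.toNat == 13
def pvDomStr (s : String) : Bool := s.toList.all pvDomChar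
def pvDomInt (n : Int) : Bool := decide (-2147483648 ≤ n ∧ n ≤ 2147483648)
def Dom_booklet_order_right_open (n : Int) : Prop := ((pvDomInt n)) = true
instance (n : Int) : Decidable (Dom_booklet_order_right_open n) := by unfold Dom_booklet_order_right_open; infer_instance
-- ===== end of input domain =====

-- B replaces A's converging left/right index loop by halving a pre-mapped page list and
-- zipping the front half with the reversed back half two pages at a time (alternative structure).

-- ===== PORT A =====
-- A's inner helper `idx` (captures n)
def pvIdx (n i : Int) : Option Int := if i < n then some i else none

-- A's while loop over the converging (left, right) pair
def pvALoop (n l r : Int) : List (Option Int) :=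
  if h : l < r then
    pvIdx n l :: pvIdx n r :: pvIdx n (r - 1) :: pvIdx n (l + 1) :: pvALoop n (l + 2) (r - 2)
  else []
termination_by (r - l).toNat
decreasing_by omega

def booklet_order_right_open (n : Int) : List (Option Int) :=
  if n ≤ 0 then []
  else
    let m := PySem.Int.floordiv (n + 3) 4 * 4
    pvALoop n 0 (m - 1)

-- ===== PORT B =====
-- Python's zip(it, it) pairing idiom: consecutive non-overlapping pairs of a list
def pvPairs (xs : List (Option Int)) : List (Option Int × Option Int) :=
  match xs with
  | a :: b :: rest => (a, b) :: pvPairs rest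
  | _ => []

def booklet_order_right_open_alt (n : Int) : List (Option Int) :=
  let m := PySem.Int.floordiv (n + 3) 4 * 4
  let pages := (PySem.List.pyRange 0 m 1).map (fun i => if i < n then some i else none)
  let half := PySem.Int.floordiv m 2
  let front := PySem.List.slice pages none (some half)
  -- pages[half:][::-1]; slice? is none only for step 0, the getD default is unreachable
  let back := (PySem.List.slice? (PySem.List.slice pages (some half) none) none none (-1)).getD []
  -- for (a, b), (d, c) in zip(zip(fi, fi), zip(bi, bi)): out += [a, d, c, b]
  (List.zip (pvPairs front) (pvPairs back)).foldl
    (fun out p => out ++ [p.1.1, p.2.1, p.2.2, p.1.2]) []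

-- ===== PRECONDITION & SPEC =====
def Spec_booklet_order_right_open (n : Int) (out : List (Option Int)) : Prop := out = booklet_order_right_open_alt n
instance (n : Int) (out : List (Option Int)) : Decidable (Spec_booklet_order_right_open n out) := by unfold Spec_booklet_order_right_open; infer_instance

-- ===== CLAIM (what is proved, stated in full; the proofs are below) =====
def Claim_equal_booklet_order_right_open : Prop := ∀ (n : Int), Dom_booklet_order_right_open n → Spec_booklet_order_right_open n (booklet_order_right_open n)

-- ===== LEMMAS AND PROOFS =====

-- the mapped segment [idx l, idx (l+1), …, idx (l+len-1)]
def pvSeg (n l : Int) (len : Nat) : List (Option Int) :=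
  (List.range len).map (fun i : Nat => pvIdx n (l + (i : Int)))

-- the descending mapped segment [idx r, idx (r-1), …, idx (r-len+1)]
def pvDseg (n r : Int) (len : Nat) : List (Option Int) :=
  (List.range len).map (fun i : Nat => pvIdx n (r - (i : Int)))

theorem pvSeg_cons (n l : Int) (len : Nat) :
    pvSeg n l (len + 1) = pvIdx n l :: pvSeg n (l + 1) len := by
  unfold pvSeg
  rw [List.range_succ_eq_map, List.map_cons, List.map_map]
  congr 1
  · norm_num
  apply List.map_congr_left
  intro i _
  simp only [Function.comp_apply]
  congr 1
  push_cast
  ring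

theorem pvDseg_cons (n r : Int) (len : Nat) :
    pvDseg n r (len + 1) = pvIdx n r :: pvDseg n (r - 1) len := by
  unfold pvDseg
  rw [List.range_succ_eq_map, List.map_cons, List.map_map]
  congr 1
  · norm_num
  apply List.map_congr_left
  intro i _
  simp only [Function.comp_apply]
  congr 1
  push_cast
  ring

theorem pvSeg_concat (n l : Int) (len : Nat) :
    pvSeg n l (len + 1) = pvSeg n l len ++ [pvIdx n (l + len)] := by
  simp [pvSeg, List.range_succ]

theorem pvSeg_append (n l : Int) (j i : Nat) :
    pvSeg n l (j + i) = pvSeg n l j ++ pvSeg n (l + j) i := by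
  induction i with
  | zero => simp [pvSeg]
  | succ i ih =>
    rw [show j + (i + 1) = (j + i) + 1 from rfl, pvSeg_concat, ih, pvSeg_concat,
      List.append_assoc]
    congr 3
    push_cast
    ring_nf

theorem pvSeg_length (n l : Int) (len : Nat) : (pvSeg n l len).length = len := by
  simp [pvSeg]

theorem pvSeg_reverse (n : Int) : ∀ (len : Nat) (l : Int),
    (pvSeg n l len).reverse = pvDseg n (l + len - 1) len := by
  intro len
  induction len with
  | zero => intro l; simp [pvSeg, pvDseg]
  | succ len ih =>
    intro l
    rw [pvSeg_concat, List.reverse_append, List.reverse_singleton, pvDseg_cons, ih l]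
    simp only [List.singleton_append, List.cons.injEq]
    refine ⟨?_, ?_⟩ <;> · congr 1; push_cast; ring

-- one iteration of B's zip loop equals one iteration of A's while loop
theorem pvZipDrain_seg (n : Int) : ∀ (k : Nat) (l : Int),
    (List.zip (pvPairs (pvSeg n l (2 * k))) (pvPairs (pvDseg n (l + 4 * k - 1) (2 * k)))).flatMap
        (fun p => [p.1.1, p.2.1, p.2.2, p.1.2])
      = pvALoop n l (l + 4 * k - 1) := by
  intro k
  induction k with
  | zero =>
    intro l
    rw [pvALoop, dif_neg (by omega)]
    rfl
  | succ k ih =>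
    intro l
    rw [show 2 * (k + 1) = (2 * k) + 1 + 1 from by ring, pvSeg_cons, pvSeg_cons,
      pvDseg_cons, pvDseg_cons, pvPairs, pvPairs, List.zip_cons_cons, List.flatMap_cons,
      pvALoop, dif_pos (by push_cast; omega)]
    have ihx := ih (l + 1 + 1)
    rw [show l + 1 + 1 + 4 * (k : Int) - 1 = l + 4 * ((k : Nat) + 1 : Nat) - 1 - 1 - 1 from by
      push_cast; ring] at ihx
    rw [ihx]
    push_cast
    ring_nf
    simp

-- ===== VERDICT (by name: the statement is the Claim_ definition above) =====
theorem booklet_order_right_open_spec : Claim_equal_booklet_order_right_open := by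
  intro n _
  unfold Spec_booklet_order_right_open booklet_order_right_open booklet_order_right_open_alt
  dsimp only
  have hrange : ∀ m : Int, (PySem.List.pyRange 0 m 1).map (fun i => if i < n then some i else none)
      = pvSeg n 0 m.toNat := by
    intro m
    rw [PySem.List.pyRange_one 0 m, List.map_map]
    simp only [pvSeg, pvIdx, Function.comp_def, zero_add, Int.sub_zero]
  by_cases hn : n ≤ 0
  · rw [if_pos hn]
    have hm : PySem.Int.floordiv (n + 3) 4 * 4 ≤ 0 := by
      have := (PySem.Int.floordiv_lt_iff_lt_mul (q := 1) (show (0:Int) < 4 by norm_num)).mpr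
        (show n + 3 < 1 * 4 by omega)
      omega
    rw [hrange, show (PySem.Int.floordiv (n + 3) 4 * 4).toNat = 0 from by omega]
    have hnil : ∀ a b : Option Int, PySem.List.slice ([] : List (Option Int)) a b = [] := by
      intro a b; unfold PySem.List.slice; simp
    rw [show pvSeg n 0 0 = [] from rfl, hnil, hnil, PySem.List.slice?_none_none_neg_one]
    rfl
  · rw [if_neg hn, hrange]
    set K := (PySem.Int.floordiv (n + 3) 4).toNat with hKdef
    have hK1 : 1 ≤ PySem.Int.floordiv (n + 3) 4 := by
      exact (PySem.Int.le_floordiv_iff_mul_le (show (0:Int) < 4 by norm_num)).mpr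
        (show 1 * 4 ≤ n + 3 by omega)
    have hKcast : PySem.Int.floordiv (n + 3) 4 = (K : Int) := by omega
    rw [hKcast]
    have hhalf : PySem.Int.floordiv ((K : Int) * 4) 2 = (2 * K : Nat) := by
      rw [PySem.Int.floordiv_eq_ediv_of_pos (by norm_num)]
      omega
    have htoNat : ((K : Int) * 4).toNat = 2 * K + 2 * K := by omega
    rw [hhalf, htoNat, pvSeg_append, PySem.List.slice_to _ (by positivity),
      PySem.List.slice_from _ (by positivity),
      show ((2 * K : Nat) : Int).toNat = 2 * K from by omega,
      List.take_left' (pvSeg_length n 0 (2 * K)),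
      List.drop_left' (pvSeg_length n 0 (2 * K)),
      PySem.List.slice?_none_none_neg_one, Option.getD_some,
      pvSeg_reverse, PySem.List.foldl_append_eq_flatMap, List.nil_append]
    have := pvZipDrain_seg n K 0
    rw [show (0 : Int) + 4 * (K : Int) - 1 = (K : Int) * 4 - 1 from by ring] at this
    rw [show (0 : Int) + (2 * K : Nat) + (2 * K : Nat) - 1 = (K : Int) * 4 - 1 from by
      push_cast; ring]
    exact this.symm
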